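-- pv_equiv track=rewrite | github.com/Chopinsky/algo-problems | challenges/1999/1163.'''LastSubstringLexicographicalOrder.py | lastSubstring0
-- ===== SOURCE A (Python) =====
-- def lastSubstring0(s: str) -> str:
--   n = len(s)
--   if n <= 1:
--     return s
--
--   if s == s[0]*n:
--     return s
--
--   top_char = max(s)
--   ans = ''
--   prev = -2
--
--   for i in range(n):
--     # only cares about substrings starting with the largest char
--     # that we have found
--     if s[i] != top_char:
--       continue
--
--     # `zzzb` is larger than `(z)zzb`, meaning if we're seeing continuing
--     # substring of `top_char`, we skip because eventually the current
--     # `ans` is the lexicographically largest one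
--     if i == prev+1:
--       prev += 1
--       continue
--
--     # only need to compare the next 26 characters, which will cover all
--     if s[i:i+26] > ans:
--       ans = s[i:]
--
--     # update the prev substring's starting index
--     prev = i
--
--   return ans
-- ===== SOURCE B (Python) =====
-- def lastSubstring0(s: str) -> str:
--     if not s:
--         return s
--     best = 0
--     for i in range(1, len(s)):
--         if s[i:i + 26] > s[best:best + 26]:
--             best = i
--     return s[best:]
-- ===== Notes on version B (the rewrite author's own statement) =====
-- stated objective: simpler
-- what changed: B drops A's whole machinery (max-char pass, constant-string early return, run-skipping prev pointer, growing answer suffix) and computes the same result as one plain argmax: the suffix starting at the first index that maximizes the fixed 26-char window s[i:i+26].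
import Mathlib
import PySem

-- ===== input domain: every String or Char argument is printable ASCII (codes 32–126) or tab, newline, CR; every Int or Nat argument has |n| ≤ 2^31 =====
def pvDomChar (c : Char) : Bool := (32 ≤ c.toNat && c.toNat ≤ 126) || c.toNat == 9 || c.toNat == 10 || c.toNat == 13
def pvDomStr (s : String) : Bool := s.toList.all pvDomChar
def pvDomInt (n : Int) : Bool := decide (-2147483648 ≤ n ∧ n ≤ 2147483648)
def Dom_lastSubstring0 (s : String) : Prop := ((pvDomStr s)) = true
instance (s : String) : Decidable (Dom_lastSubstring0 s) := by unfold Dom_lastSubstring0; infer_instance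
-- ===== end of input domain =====

-- B replaces A's whole machinery (max-char pass, run-skipping via prev, growing answer
-- string) by one plain argmax: the answer is the suffix at the first index maximizing the
-- 26-char window s[i:i+26]; objective: simpler.


-- ===== PORT A =====
-- loop body of A's `for i in range(n)`, on state (ans, prev)
def stepA (cs : List Char) (top : Char) (st : List Char × Int) (i : Nat) : List Char × Int :=
  if cs.getD i ' ' ≠ top then st                                   -- if s[i] != top_char: continue
  else if (i : Int) = st.2 + 1 then (st.1, st.2 + 1)               -- if i == prev+1: prev += 1; continue
  else if st.1 < PySem.List.slice cs (some (i : Int)) (some ((i : Int) + 26)) then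
    (PySem.List.slice cs (some (i : Int)) none, (i : Int))         -- ans = s[i:]; prev = i
  else (st.1, (i : Int))                                           -- prev = i

def lastSubstring0 (s : String) : String :=
  let cs := s.toList
  let n := cs.length
  if n ≤ 1 then s
  else if cs = List.replicate n (cs.getD 0 ' ') then s             -- s == s[0]*n
  else
    let top := (PySem.List.max? cs (fun c => c)).getD ' '          -- max(s)
    let fin := (List.range n).foldl (stepA cs top) ([], -2)        -- ans = ''; prev = -2
    String.ofList fin.1

-- ===== PORT B =====
-- loop body of B's `for i in range(1, n)`: keep the first argmax of the window s[i:i+26]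
def stepB (cs : List Char) (best : Nat) (i : Nat) : Nat :=
  if PySem.List.slice cs (some (best : Int)) (some ((best : Int) + 26))
      < PySem.List.slice cs (some (i : Int)) (some ((i : Int) + 26)) then i
  else best

def lastSubstring0_alt (s : String) : String :=
  let cs := s.toList
  if cs.length = 0 then s                                          -- if not s: return s
  else
    let best := (List.range' 1 (cs.length - 1)).foldl (stepB cs) 0 -- for i in range(1, n)
    String.ofList (PySem.List.slice cs (some (best : Int)) none)   -- return s[best:]

-- ===== PRECONDITION & SPEC =====
def Spec_lastSubstring0 (s : String) (out : String) : Prop := out = lastSubstring0_alt s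
instance (s : String) (out : String) : Decidable (Spec_lastSubstring0 s out) := by unfold Spec_lastSubstring0; infer_instance

-- ===== CLAIM (what is proved, stated in full; the proofs are below) =====
def Claim_equal_lastSubstring0 : Prop := ∀ (s : String), Dom_lastSubstring0 s → Spec_lastSubstring0 s (lastSubstring0 s)

-- ===== LEMMAS AND PROOFS =====

-- the 26-char window at index i
def Wn (cs : List Char) (i : Nat) : List Char := (cs.drop i).take 26

-- A's slice s[i:i+26] for a natural index i is the window
lemma sliceA_eq (cs : List Char) (i : Nat) :
    PySem.List.slice cs (some (i : Int)) (some ((i : Int) + 26)) = Wn cs i := by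
  have h : ((i : Int) + 26) = (((i + 26 : Nat)) : Int) := by push_cast; ring
  rw [h, PySem.List.slice_natCast, Wn]
  congr 1
  omega

-- comparing a k-truncated list against a list is comparing it against the k-truncation
lemma lex_take (k : Nat) : ∀ (x y : List Char), (y < x.take k ↔ y.take k < x.take k) := by
  induction k with
  | zero => intro x y; simp [List.not_lt_nil]
  | succ k ih =>
    intro x y
    cases x with
    | nil => simp [List.not_lt_nil]
    | cons a xs =>
      cases y with
      | nil => simp [List.nil_lt_cons]
      | cons b ys =>
        rw [List.take_succ_cons, List.take_succ_cons, List.cons_lt_cons_iff,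
          List.cons_lt_cons_iff, ih xs ys]

-- a head bounding every element pushes the window at i-1 above the window at i
lemma head_bound (k : Nat) : ∀ (l : List Char) (c : Char), (∀ x ∈ l, x ≤ c) →
    ¬ (c :: l.take k < l.take (k + 1)) := by
  induction k with
  | zero =>
    intro l c hb
    cases l with
    | nil => simp [List.not_lt_nil]
    | cons x xs =>
      simp only [List.take_zero, List.take_succ_cons, List.cons_lt_cons_iff]
      rintro (h | ⟨_, h⟩)
      · exact absurd h (not_lt_of_ge (hb x (by simp)))
      · exact List.not_lt_nil _ h
  | succ k ih =>
    intro l c hb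
    cases l with
    | nil => exact List.not_lt_nil _
    | cons x xs =>
      rw [List.take_succ_cons, List.take_succ_cons, List.cons_lt_cons_iff]
      rintro (h | ⟨hcx, h⟩)
      · exact absurd h (not_lt_of_ge (hb x (by simp)))
      · exact ih xs x (fun y hy => hcx ▸ hb y (by simp [hy])) h

lemma win_nil_lt (cs : List Char) (i : Nat) (hi : i < cs.length) : ([] : List Char) < Wn cs i := by
  rw [Wn, List.drop_eq_getElem_cons hi, List.take_succ_cons]
  exact List.nil_lt_cons _ _

lemma win_lt_of_head_lt (cs : List Char) (i j : Nat) (hi : i < cs.length) (hj : j < cs.length)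
    (h : cs.getD i ' ' < cs.getD j ' ') : Wn cs i < Wn cs j := by
  rw [Wn, Wn, List.drop_eq_getElem_cons hi, List.drop_eq_getElem_cons hj,
    List.take_succ_cons, List.take_succ_cons, List.cons_lt_cons_iff]
  left
  rwa [List.getD_eq_getElem cs ' ' hi, List.getD_eq_getElem cs ' ' hj] at h

-- if s[p] is the maximal character, the window at p dominates the window at p+1
lemma win_succ_le (cs : List Char) (top : Char) (htop : ∀ x ∈ cs, x ≤ top) (p : Nat)
    (hp : p < cs.length) (hptop : cs.getD p ' ' = top) : ¬ (Wn cs p < Wn cs (p + 1)) := by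
  rw [Wn, Wn, List.drop_eq_getElem_cons hp, List.take_succ_cons]
  intro hlt
  have hx : cs[p] = top := by rwa [List.getD_eq_getElem cs ' ' hp] at hptop
  rw [hx] at hlt
  exact head_bound 25 (cs.drop (p + 1)) top
    (fun y hy => htop y (List.mem_of_mem_drop hy)) hlt

-- the joint loop invariant: after indices [0, i), B's best is the first argmax of the
-- window, and A's (ans, prev) is (s[best:], last top index) once a top char was seen
def JInv (cs : List Char) (top : Char) (i : Nat) (stA : List Char × Int) (b : Nat) : Prop :=
  b < i ∧
  (∀ j, j < i → ¬ (Wn cs b < Wn cs j)) ∧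
  (∀ j, j < b → Wn cs j < Wn cs b) ∧
  ((∀ j, j < i → cs.getD j ' ' ≠ top) → stA = ([], -2)) ∧
  (∀ j, j < i → cs.getD j ' ' = top →
    stA.1 = cs.drop b ∧ ∃ p : Nat, stA.2 = (p : Int) ∧ p < i ∧ cs.getD p ' ' = top ∧
      ∀ j', p < j' → j' < i → cs.getD j' ' ' ≠ top)

lemma step_inv (cs : List Char) (top : Char) (htop : ∀ x ∈ cs, x ≤ top) (i : Nat)
    (hi : i < cs.length) (stA : List Char × Int) (b : Nat) (h : JInv cs top i stA b) :
    JInv cs top (i + 1) (stepA cs top stA i) (stepB cs b i) := by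
  obtain ⟨ans, prev⟩ := stA
  obtain ⟨h1, h2, h3, h4, h5⟩ := h
  have hble : b < cs.length := lt_trans h1 hi
  rw [stepA, stepB, sliceA_eq, sliceA_eq]
  by_cases hc : cs.getD i ' ' = top
  · rw [if_neg (not_not_intro hc)]
    by_cases hex : ∃ j, j < i ∧ cs.getD j ' ' = top
    · obtain ⟨j0, hj0, hj0t⟩ := hex
      obtain ⟨hans, p, hprev, hpi, hptop, hpmax⟩ := h5 j0 hj0 hj0t
      dsimp only at hans hprev
      by_cases hadj : (i : Int) = prev + 1
      · -- continuing run of top chars: A skips, B cannot improve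
        rw [if_pos hadj]
        have hpi' : i = p + 1 := by rw [hprev] at hadj; exact_mod_cast hadj
        have hWip : ¬ (Wn cs p < Wn cs i) := by
          rw [hpi']; exact win_succ_le cs top htop p (by omega) hptop
        have hWbi : ¬ (Wn cs b < Wn cs i) := fun hlt => by
          rcases lt_or_ge (Wn cs b) (Wn cs p) with h' | h'
          · exact h2 p hpi h'
          · exact hWip (lt_of_le_of_lt h' hlt)
        rw [if_neg hWbi]
        refine ⟨by omega, ?_, h3, ?_, ?_⟩
        · intro j hj
          rcases Nat.lt_succ_iff_lt_or_eq.mp hj with hj' | hj'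
          · exact h2 j hj'
          · rw [hj']; exact hWbi
        · intro hno; exact absurd hc (hno i (by omega))
        · intro j _ _
          refine ⟨hans, i, ?_, by omega, hc, fun j' hj1 hj2 => by omega⟩
          dsimp only
          rw [hprev] at hadj ⊢
          rw [hadj]
      · -- a fresh top candidate: both sides compare the same windows
        rw [if_neg hadj, hans]
        dsimp only
        have hiff : (cs.drop b < Wn cs i) ↔ (Wn cs b < Wn cs i) :=
          lex_take 26 (cs.drop i) (cs.drop b)
        by_cases hlt : Wn cs b < Wn cs i
        · rw [if_pos (hiff.mpr hlt), if_pos hlt]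
          refine ⟨by omega, ?_, ?_, ?_, ?_⟩
          · intro j hj
            rcases Nat.lt_succ_iff_lt_or_eq.mp hj with hj' | hj'
            · intro hlt2
              exact absurd (lt_trans (lt_of_lt_of_le hlt2 (not_lt.mp (h2 j hj'))) hlt)
                (lt_irrefl _)
            · rw [hj']; exact lt_irrefl _
          · intro j hj
            exact lt_of_le_of_lt (not_lt.mp (h2 j (by omega))) hlt
          · intro hno; exact absurd hc (hno i (by omega))
          · intro j _ _
            refine ⟨by simp [PySem.List.slice_from_natCast], i, rfl, by omega, hc,
              fun j' hj1 hj2 => by omega⟩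
        · rw [if_neg (fun hx => hlt (hiff.mp hx)), if_neg hlt]
          refine ⟨by omega, ?_, h3, ?_, ?_⟩
          · intro j hj
            rcases Nat.lt_succ_iff_lt_or_eq.mp hj with hj' | hj'
            · exact h2 j hj'
            · rw [hj']; exact hlt
          · intro hno; exact absurd hc (hno i (by omega))
          · intro j _ _
            exact ⟨rfl, i, rfl, by omega, hc, fun j' hj1 hj2 => by omega⟩
    · -- the very first top char: A starts its answer, B jumps here too
      push Not at hex
      have h40 := h4 (fun j hj => hex j hj)
      have hans : ans = [] := congrArg Prod.fst h40
      have hprev : prev = -2 := congrArg Prod.snd h40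
      have hadj : ¬ ((i : Int) = prev + 1) := by rw [hprev]; omega
      rw [if_neg hadj, hans]
      rw [if_pos (win_nil_lt cs i hi)]
      have hbtop : cs.getD b ' ' ≠ top := hex b h1
      have hblt : Wn cs b < Wn cs i := by
        apply win_lt_of_head_lt cs b i hble hi
        have := htop (cs.getD b ' ') (by
          rw [List.getD_eq_getElem cs ' ' hble]; exact List.getElem_mem _)
        rcases lt_or_eq_of_le this with h' | h'
        · rwa [hc]
        · exact absurd h' hbtop
      rw [if_pos hblt]
      refine ⟨by omega, ?_, ?_, ?_, ?_⟩
      · intro j hj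
        rcases Nat.lt_succ_iff_lt_or_eq.mp hj with hj' | hj'
        · intro hlt2
          exact absurd (lt_trans (lt_of_lt_of_le hlt2 (not_lt.mp (h2 j hj'))) hblt)
            (lt_irrefl _)
        · rw [hj']; exact lt_irrefl _
      · intro j hj
        exact lt_of_le_of_lt (not_lt.mp (h2 j (by omega))) hblt
      · intro hno; exact absurd hc (hno i (by omega))
      · intro j _ _
        refine ⟨by simp [PySem.List.slice_from_natCast], i, rfl, by omega, hc,
          fun j' hj1 hj2 => by omega⟩
  · -- not the top char: A skips; B cannot improve either once a top char was seen
    rw [if_pos hc]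
    by_cases hex : ∃ j, j < i ∧ cs.getD j ' ' = top
    · obtain ⟨j0, hj0, hj0t⟩ := hex
      have hilt : Wn cs i < Wn cs j0 := by
        apply win_lt_of_head_lt cs i j0 hi (by omega)
        have := htop (cs.getD i ' ') (by
          rw [List.getD_eq_getElem cs ' ' hi]; exact List.getElem_mem _)
        rw [hj0t]
        rcases lt_or_eq_of_le this with h' | h'
        · exact h'
        · exact absurd h' hc
      have hWbi : ¬ (Wn cs b < Wn cs i) :=
        fun hlt => h2 j0 hj0 (lt_trans hlt hilt)
      rw [if_neg hWbi]
      refine ⟨by omega, ?_, h3, ?_, ?_⟩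
      · intro j hj
        rcases Nat.lt_succ_iff_lt_or_eq.mp hj with hj' | hj'
        · exact h2 j hj'
        · rw [hj']; exact hWbi
      · intro hno; exact absurd hj0t (hno j0 (by omega))
      · intro j hj hjt
        have hj' : j < i := by
          rcases Nat.lt_succ_iff_lt_or_eq.mp hj with h' | h'
          · exact h'
          · exact absurd (h' ▸ hjt) hc
        obtain ⟨hans, p, hprev, hpi, hptop, hpmax⟩ := h5 j hj' hjt
        refine ⟨hans, p, hprev, by omega, hptop, ?_⟩
        intro j' hj1 hj2
        rcases Nat.lt_succ_iff_lt_or_eq.mp hj2 with h' | h'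
        · exact hpmax j' hj1 h'
        · rw [h']; exact hc
    · -- no top char yet: B's plain argmax step, A's state stays ('', -2)
      push Not at hex
      by_cases hlt : Wn cs b < Wn cs i
      · rw [if_pos hlt]
        refine ⟨by omega, ?_, ?_, ?_, ?_⟩
        · intro j hj
          rcases Nat.lt_succ_iff_lt_or_eq.mp hj with hj' | hj'
          · intro hlt2
            exact absurd (lt_trans (lt_of_lt_of_le hlt2 (not_lt.mp (h2 j hj'))) hlt)
              (lt_irrefl _)
          · rw [hj']; exact lt_irrefl _
        · intro j hj
          exact lt_of_le_of_lt (not_lt.mp (h2 j (by omega))) hlt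
        · intro _; exact h4 (fun j hj => hex j hj)
        · intro j hj hjt
          have : j = i := by
            rcases Nat.lt_succ_iff_lt_or_eq.mp hj with h' | h'
            · exact absurd hjt (hex j h')
            · exact h'
          exact absurd (this ▸ hjt) hc
      · rw [if_neg hlt]
        refine ⟨by omega, ?_, h3, ?_, ?_⟩
        · intro j hj
          rcases Nat.lt_succ_iff_lt_or_eq.mp hj with hj' | hj'
          · exact h2 j hj'
          · rw [hj']; exact hlt
        · intro _; exact h4 (fun j hj => hex j hj)
        · intro j hj hjt
          have : j = i := by
            rcases Nat.lt_succ_iff_lt_or_eq.mp hj with h' | h'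
            · exact absurd hjt (hex j h')
            · exact h'
          exact absurd (this ▸ hjt) hc

lemma init_inv (cs : List Char) (top : Char) (h0 : 0 < cs.length) :
    JInv cs top 1 (stepA cs top ([], -2) 0) 0 := by
  rw [stepA]
  by_cases hc : cs.getD 0 ' ' = top
  · rw [if_neg (not_not_intro hc)]
    dsimp only
    rw [if_neg (by norm_num), if_pos (by rw [sliceA_eq]; exact win_nil_lt cs 0 h0)]
    refine ⟨by omega, ?_, by omega, ?_, ?_⟩
    · intro j hj
      have : j = 0 := by omega
      rw [this]; exact lt_irrefl _
    · intro hno; exact absurd hc (hno 0 (by omega))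
    · intro j _ _
      refine ⟨by simp, 0, by norm_num, by omega, hc,
        fun j' hj1 hj2 => by omega⟩
  · rw [if_pos hc]
    refine ⟨by omega, ?_, by omega, fun _ => rfl, ?_⟩
    · intro j hj
      have : j = 0 := by omega
      rw [this]; exact lt_irrefl _
    · intro j hj hjt
      have : j = 0 := by omega
      exact absurd (this ▸ hjt) hc

lemma fold_inv (cs : List Char) (top : Char) (htop : ∀ x ∈ cs, x ≤ top) :
    ∀ (k i0 : Nat) (stA : List Char × Int) (b : Nat), i0 + k ≤ cs.length →
    JInv cs top i0 stA b →
    JInv cs top (i0 + k) ((List.range' i0 k).foldl (stepA cs top) stA)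
      ((List.range' i0 k).foldl (stepB cs) b) := by
  intro k
  induction k with
  | zero => intro i0 stA b _ h; simpa using h
  | succ k ih =>
    intro i0 stA b hle h
    rw [List.range'_succ, List.foldl_cons, List.foldl_cons]
    have := ih (i0 + 1) _ _ (by omega) (step_inv cs top htop i0 (by omega) stA b h)
    have harith : i0 + 1 + k = i0 + (k + 1) := by omega
    rwa [harith] at this

-- replicates of one char compare by length
lemma replicate_lt (c : Char) : ∀ (a b : Nat),
    (List.replicate a c < List.replicate b c) ↔ a < b := by
  intro a
  induction a with
  | zero =>
    intro b
    cases b with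
    | zero => simp
    | succ b => simp [List.replicate_succ, List.nil_lt_cons]
  | succ a ih =>
    intro b
    cases b with
    | zero => simp [List.replicate_succ, List.not_lt_nil]
    | succ b =>
      rw [List.replicate_succ, List.replicate_succ, List.cons_lt_cons_iff]
      simp [ih b]

-- on a constant string B's loop never moves off index 0
lemma fold_const (n : Nat) (c : Char) :
    ∀ (k i0 : Nat), (List.range' i0 k).foldl (stepB (List.replicate n c)) 0 = 0 := by
  intro k
  induction k with
  | zero => intro i0; simp
  | succ k ih =>
    intro i0
    rw [List.range'_succ, List.foldl_cons]
    have hstep : stepB (List.replicate n c) 0 i0 = 0 := by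
      rw [stepB, sliceA_eq, sliceA_eq]
      rw [if_neg ?_]
      rw [Wn, Wn, List.drop_replicate, List.drop_replicate, List.take_replicate,
        List.take_replicate, replicate_lt]
      omega
    rw [hstep, ih]

-- B returns s on every nonempty constant string (covers A's two early returns)
lemma alt_const (s : String) (c : Char) (n : Nat) (hn : 1 ≤ n)
    (hs : s.toList = List.replicate n c) : lastSubstring0_alt s = s := by
  rw [lastSubstring0_alt]
  dsimp only
  rw [if_neg (by rw [hs]; simp; omega), hs, fold_const n c]
  rw [PySem.List.slice_from_natCast, List.drop_zero, ← hs, String.ofList_toList]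

-- ===== VERDICT (by name: the statement is the Claim_ definition above) =====
theorem lastSubstring0_spec : Claim_equal_lastSubstring0 := by
  intro s _
  unfold Spec_lastSubstring0
  by_cases h0 : s.toList.length = 0
  · rw [lastSubstring0, lastSubstring0_alt]
    dsimp only
    rw [if_pos (by omega), if_pos h0]
  · by_cases hrep : s.toList = List.replicate s.toList.length (s.toList.getD 0 ' ')
    · have hA : lastSubstring0 s = s := by
        rw [lastSubstring0]
        dsimp only
        by_cases h1 : s.toList.length ≤ 1
        · rw [if_pos h1]
        · rw [if_neg h1, if_pos hrep]
      rw [hA, alt_const s (s.toList.getD 0 ' ') s.toList.length (by omega) hrep]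
    · by_cases h1 : s.toList.length = 1
      · exfalso
        apply hrep
        rcases hl : s.toList with _ | ⟨c, tl⟩
        · rw [hl] at h1; simp at h1
        · rw [hl] at h1
          simp at h1
          rw [h1]
          simp
      · -- main case: n ≥ 2 and s not constant; both loops run, tied by JInv
        rw [lastSubstring0, lastSubstring0_alt]
        dsimp only
        rw [if_neg (by omega), if_neg hrep, if_neg h0]
        set cs := s.toList with hcs
        set top := (PySem.List.max? cs (fun c => c)).getD ' ' with htopdef
        have hne : cs ≠ [] := by
          intro h; rw [h] at h0; simp at h0
        have hm : ∃ m, PySem.List.max? cs (fun c => c) = some m := by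
          cases hmm : PySem.List.max? cs (fun c => c) with
          | none =>
            rw [PySem.List.max?_eq_none_iff] at hmm
            exact absurd hmm hne
          | some m => exact ⟨m, rfl⟩
        obtain ⟨m, hmval⟩ := hm
        have htop : ∀ x ∈ cs, x ≤ top := by
          intro x hx
          rw [htopdef, hmval]
          exact PySem.List.max?_isMax hmval x hx
        have hlen : 2 ≤ cs.length := by omega
        have hinv := fold_inv cs top htop (cs.length - 1) 1
          (stepA cs top ([], -2) 0) 0 (by omega) (init_inv cs top (by omega))
        have harith : 1 + (cs.length - 1) = cs.length := by omega
        rw [harith] at hinv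
        have hsplit : List.range cs.length = 0 :: List.range' 1 (cs.length - 1) := by
          rw [List.range_eq_range']
          have h : cs.length = (cs.length - 1) + 1 := by omega
          conv_lhs => rw [h, List.range'_succ]
        rw [hsplit, List.foldl_cons]
        obtain ⟨_, _, _, _, h5⟩ := hinv
        -- the top char occurs somewhere, so A's final ans is cs.drop best
        have hmem := PySem.List.max?_mem hmval
        obtain ⟨j, hj, hje⟩ := List.mem_iff_getElem.mp hmem
        have hjt : cs.getD j ' ' = top := by
          rw [List.getD_eq_getElem _ _ hj, hje, htopdef, hmval]
          rfl
        obtain ⟨hans, _⟩ := h5 j hj hjt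
        rw [hans, PySem.List.slice_from_natCast]
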